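-- pv_equiv track=rewrite | github.com/4vent/sta_label_photo | modules/compair_strings.py | compairString
-- ===== SOURCE A (Python) =====
-- def compairString(large, small):
--     for l, s in zip(large, small):
--         if l == s:
--             continue
--         else:
--             if ord(l) > ord(s):
--                 return True
--             else:
--                 return False
-- ===== SOURCE B (Python) =====
-- def compairString(large, small):
--     n = min(len(large), len(small))
--     a, b = large[:n], small[:n]
--     if a > b:
--         return True
--     if a < b:
--         return False
--     return None
-- ===== Notes on version B (the rewrite author's own statement) =====
-- stated objective: simpler
-- what changed: Replaced the explicit char-by-char zip loop with a closed-form comparison of the equal-length prefixes large[:n] and small[:n] (n = min of lengths) using Python's built-in lexicographic string comparison; equal prefixes fall through to None exactly like the exhausted loop.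
import Mathlib
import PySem

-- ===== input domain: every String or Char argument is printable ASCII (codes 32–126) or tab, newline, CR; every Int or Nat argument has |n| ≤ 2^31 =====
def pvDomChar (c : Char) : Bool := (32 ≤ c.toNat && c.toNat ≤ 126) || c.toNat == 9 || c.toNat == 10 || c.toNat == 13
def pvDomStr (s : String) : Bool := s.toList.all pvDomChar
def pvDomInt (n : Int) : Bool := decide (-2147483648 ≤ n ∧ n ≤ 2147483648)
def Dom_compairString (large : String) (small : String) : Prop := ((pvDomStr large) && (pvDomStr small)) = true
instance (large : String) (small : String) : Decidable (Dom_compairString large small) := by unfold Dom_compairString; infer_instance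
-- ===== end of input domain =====

-- B replaces A's explicit char-by-char loop with one lexicographic comparison of the equal-length prefixes (simpler).

-- ===== PORT A =====
-- the 'for l, s in zip(large, small)' loop, step for step
def compairLoopA : List (Char × Char) → Option Bool
  | [] => none
  | (l, s) :: rest =>
    if l == s then compairLoopA rest
    else if l.toNat > s.toNat then some true else some false

def compairString (large : String) (small : String) : Option Bool :=
  compairLoopA (large.toList.zip small.toList)

-- ===== PORT B =====
-- Python's built-in lexicographic comparison of strings, as an Ordering
def pyStrCmp : List Char → List Char → Ordering
  | [], [] => .eq
  | [], _ :: _ => .lt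
  | _ :: _, [] => .gt
  | a :: as, b :: bs =>
    if a.toNat < b.toNat then .lt
    else if b.toNat < a.toNat then .gt
    else pyStrCmp as bs

def compairString_alt (large : String) (small : String) : Option Bool :=
  let n := min large.toList.length small.toList.length
  let a := large.toList.take n
  let b := small.toList.take n
  match pyStrCmp a b with
  | .gt => some true
  | .lt => some false
  | .eq => none

-- ===== PRECONDITION & SPEC =====
def Spec_compairString (large : String) (small : String) (out : Option Bool) : Prop := out = compairString_alt large small
instance (large : String) (small : String) (out : Option Bool) : Decidable (Spec_compairString large small out) := by unfold Spec_compairString; infer_instance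

-- ===== CLAIM (what is proved, stated in full; the proofs are below) =====
def Claim_equal_compairString : Prop := ∀ (large : String) (small : String), Dom_compairString large small → Spec_compairString large small (compairString large small)

-- ===== LEMMAS AND PROOFS =====
theorem compair_key (as : List Char) : ∀ (bs : List Char),
    compairLoopA (as.zip bs) =
      (match pyStrCmp (as.take (min as.length bs.length)) (bs.take (min as.length bs.length)) with
       | .gt => some true | .lt => some false | .eq => none) := by
  induction as with
  | nil => intro bs; simp [compairLoopA, pyStrCmp]
  | cons a as ih =>
    intro bs
    cases bs with
    | nil => simp [compairLoopA, pyStrCmp]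
    | cons b bs =>
      simp only [List.zip_cons_cons, compairLoopA, List.length_cons,
        Nat.succ_min_succ, List.take_succ_cons]
      by_cases h : a = b
      · subst h
        simp [pyStrCmp, ih bs]
      · have hne : a.toNat ≠ b.toNat := fun hc => h (Char.ext (UInt32.toNat_inj.mp hc))
        simp only [beq_iff_eq, if_neg h, pyStrCmp]
        rcases Nat.lt_or_ge a.toNat b.toNat with hlt | hge
        · simp [hlt, Nat.not_lt.mpr (Nat.le_of_lt hlt)]
        · have hgt : b.toNat < a.toNat := Nat.lt_of_le_of_ne hge (Ne.symm hne)
          simp [Nat.not_lt.mpr hge, hgt]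

-- ===== VERDICT (by name: the statement is the Claim_ definition above) =====
theorem compairString_spec : Claim_equal_compairString := by
  intro large small _
  unfold Spec_compairString compairString compairString_alt
  exact compair_key large.toList small.toList
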